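-- pv_equiv track=rewrite | github.com/gabriellaec/desoft-analise-exercicios | backup/user_344/ch63_2020_04_27_19_52_31_346923.py | pos_arroba
-- ===== SOURCE A (Python) =====
-- def pos_arroba(email):
--     pos = -1
--     i=0
--     n = len(email)
--     while i < n:
--         if email[i] == '@':
--             pos = i
--         i += 1
--     return pos
-- ===== SOURCE B (Python) =====
-- def pos_arroba(email):
--     return email.rfind('@')
-- ===== Notes on version B (the rewrite author's own statement) =====
-- stated objective: idiomatic
-- what changed: B replaces A's forward index loop with a last-seen accumulator by a single call to the standard-library right-to-left search str.rfind, which also runs in C instead of a Python-level loop.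
import Mathlib
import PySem

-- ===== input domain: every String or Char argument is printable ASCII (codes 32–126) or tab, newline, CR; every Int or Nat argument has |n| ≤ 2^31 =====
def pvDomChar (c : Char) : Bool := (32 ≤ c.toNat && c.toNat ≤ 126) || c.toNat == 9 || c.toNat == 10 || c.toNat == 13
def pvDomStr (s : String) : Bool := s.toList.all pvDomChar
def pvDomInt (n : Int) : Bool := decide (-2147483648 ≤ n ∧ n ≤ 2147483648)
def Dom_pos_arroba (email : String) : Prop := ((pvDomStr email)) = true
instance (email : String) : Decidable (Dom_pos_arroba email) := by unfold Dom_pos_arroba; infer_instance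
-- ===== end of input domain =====

-- B replaces A's forward index loop with a last-seen accumulator by the standard
-- library's right-to-left search email.rfind('@') (idiomatic); same O(n) cost.


-- ===== PORT A =====
-- while loop over indices 0..n-1, updating the accumulator pos at each '@'
def posArrobaAuxA : List Char → Int → Int → Int
  | [], _, pos => pos
  | c :: rest, i, pos => posArrobaAuxA rest (i + 1) (if c = '@' then i else pos)

def pos_arroba (email : String) : Int :=
  posArrobaAuxA email.toList 0 (-1)

-- ===== PORT B =====
-- email.rfind('@')
def pos_arroba_alt (email : String) : Int :=
  PySem.Str.rfind email "@"

-- ===== PRECONDITION & SPEC =====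
def Spec_pos_arroba (email : String) (out : Int) : Prop := out = pos_arroba_alt email
instance (email : String) (out : Int) : Decidable (Spec_pos_arroba email out) := by unfold Spec_pos_arroba; infer_instance

-- ===== CLAIM (what is proved, stated in full; the proofs are below) =====
def Claim_equal_pos_arroba : Prop := ∀ (email : String), Dom_pos_arroba email → Spec_pos_arroba email (pos_arroba email)

-- ===== LEMMAS AND PROOFS =====
theorem posArrobaAuxA_snoc (l : List Char) (c : Char) (i pos : Int) :
    posArrobaAuxA (l ++ [c]) i pos
      = if c = '@' then i + l.length else posArrobaAuxA l i pos := by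
  induction l generalizing i pos with
  | nil => simp [posArrobaAuxA]
  | cons d t ih =>
      simp only [List.cons_append, posArrobaAuxA, ih, List.length_cons]
      split <;> · push_cast; ring_nf

theorem rfind_go_succ (s sub : List Char) (j : Nat) :
    PySem.Chars.rfind.go s sub (j + 1) =
      if sub.isPrefixOf (s.drop (j + 1)) then ((j : Int) + 1)
      else PySem.Chars.rfind.go s sub j := by
  simp [PySem.Chars.rfind.go]

theorem rfind_go_append_lt (l : List Char) (c : Char) :
    ∀ x : Nat, x < l.length →
      PySem.Chars.rfind.go (l ++ [c]) ['@'] x = PySem.Chars.rfind.go l ['@'] x := by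
  intro x
  induction x with
  | zero =>
      intro hx
      cases l with
      | nil => simp at hx
      | cons d t => simp [PySem.Chars.rfind.go, List.isPrefixOf]
  | succ j ih =>
      intro hx
      rw [rfind_go_succ, rfind_go_succ, ih (by omega)]
      have hd : (l ++ [c]).drop (j + 1) = l.drop (j + 1) ++ [c] := by
        rw [List.drop_append_of_le_length (by omega)]
      have hne : l.drop (j + 1) ≠ [] := by
        intro h
        have := List.drop_eq_nil_iff.mp h
        omega
      cases hdl : l.drop (j + 1) with
      | nil => exact absurd hdl hne
      | cons d t => simp [hd, hdl, List.isPrefixOf]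

theorem rfind_snoc (l : List Char) (c : Char) :
    PySem.Chars.rfind (l ++ [c]) ['@']
      = if c = '@' then (l.length : Int) else PySem.Chars.rfind l ['@'] := by
  unfold PySem.Chars.rfind
  simp only [List.length_append, List.length_singleton]
  rw [rfind_go_succ]
  have h1 : (l ++ [c]).drop (l.length + 1) = [] := by
    simp
  rw [h1]
  simp only [List.isPrefixOf, if_false, Bool.false_eq_true]
  have h2 : (l ++ [c]).drop l.length = [c] := by
    simp
  cases l with
  | nil =>
      by_cases hc : c = '@'
      · subst hc; simp [PySem.Chars.rfind.go, List.isPrefixOf]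
      · simp [PySem.Chars.rfind.go, List.isPrefixOf, hc, Ne.symm hc]
  | cons d t =>
      have hlen : (d :: t).length = t.length + 1 := rfl
      rw [hlen, rfind_go_succ, rfind_go_succ]
      rw [hlen] at h2
      rw [h2]
      have h3 : (d :: t).drop (t.length + 1) = [] := by
        simp
      rw [h3]
      have h4 : PySem.Chars.rfind.go (d :: t ++ [c]) ['@'] t.length
          = PySem.Chars.rfind.go (d :: t) ['@'] t.length :=
        rfind_go_append_lt (d :: t) c t.length (by simp)
      rw [h4]
      by_cases hc : c = '@'
      · subst hc; simp [List.isPrefixOf]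
      · simp [List.isPrefixOf, hc, Ne.symm hc]

theorem auxA_eq_rfind (l : List Char) :
    posArrobaAuxA l 0 (-1) = PySem.Chars.rfind l ['@'] := by
  induction l using List.reverseRecOn with
  | nil => simp [posArrobaAuxA, PySem.Chars.rfind, PySem.Chars.rfind.go, List.isPrefixOf]
  | append_singleton t c ih =>
      rw [posArrobaAuxA_snoc, rfind_snoc, ih]
      split <;> simp

-- ===== VERDICT (by name: the statement is the Claim_ definition above) =====
theorem pos_arroba_spec : Claim_equal_pos_arroba := by
  intro email _
  unfold Spec_pos_arroba pos_arroba pos_arroba_alt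
  rw [PySem.Str.rfind_eq]
  simpa using auxA_eq_rfind email.toList
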